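-- pv_equiv track=rewrite | github.com/KajalGada/leetcode-python | leetcode 1525 Number of Good Ways to Split a String/sol1.py | computeUnique
-- ===== SOURCE A (Python) =====
-- def computeUnique(s: str) -> list[int]:
--
--     letters_map = {}
--     uniq_letters = []
--     count = 0
--
--     for ch in s:
--         if ch not in letters_map:
--             count += 1
--             letters_map[ch] = 0
--         uniq_letters.append(count)
--
--     return uniq_letters
-- ===== SOURCE B (Python) =====
-- def computeUnique(s: str) -> list[int]:
--     return [len(set(s[:i + 1])) for i in range(len(s))]
-- ===== Notes on version B (the rewrite author's own statement) =====
-- stated objective: simpler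
-- what changed: B drops A's incremental dict+counter loop entirely and recomputes each entry independently as the distinct-character count of the prefix, len(set(s[:i+1])), in a single comprehension over indices.
import Mathlib
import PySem

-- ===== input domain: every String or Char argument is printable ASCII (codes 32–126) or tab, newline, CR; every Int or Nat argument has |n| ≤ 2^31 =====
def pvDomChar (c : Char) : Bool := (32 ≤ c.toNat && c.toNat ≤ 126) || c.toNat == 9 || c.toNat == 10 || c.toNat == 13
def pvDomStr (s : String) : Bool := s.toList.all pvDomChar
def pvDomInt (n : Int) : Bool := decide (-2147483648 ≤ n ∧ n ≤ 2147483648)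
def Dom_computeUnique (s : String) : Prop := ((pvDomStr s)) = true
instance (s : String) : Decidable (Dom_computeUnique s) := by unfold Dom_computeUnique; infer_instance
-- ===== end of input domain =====

-- B replaces A's incremental dict+counter loop by an index comprehension that recomputes each entry
-- independently as len(set(s[:i+1])); objective: simpler (stateless), at the cost of quadratic work.


-- ===== PORT A =====
-- loop: for ch in s: if ch not in letters_map: count+=1; letters_map[ch]=0; uniq_letters.append(count)
def pvALoop : List Char → PySem.Dict Char Int → Int → List Int
  | [], _, _ => []
  | ch :: rest, lettersMap, count =>
    if lettersMap.contains ch then count :: pvALoop rest lettersMap count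
    else (count + 1) :: pvALoop rest (lettersMap.insert ch 0) (count + 1)

def computeUnique (s : String) : List Int := pvALoop s.toList PySem.Dict.empty 0

-- ===== PORT B =====
-- [len(set(s[:i+1])) for i in range(len(s))]
def computeUnique_alt (s : String) : List Int :=
  (PySem.List.pyRange 0 (s.toList.length : Int) 1).map
    (fun i => ((PySem.Set.ofList (PySem.List.slice s.toList none (some (i + 1)))).length : Int))

-- ===== PRECONDITION & SPEC =====
def Spec_computeUnique (s : String) (out : List Int) : Prop := out = computeUnique_alt s
instance (s : String) (out : List Int) : Decidable (Spec_computeUnique s out) := by unfold Spec_computeUnique; infer_instance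

-- ===== CLAIM (what is proved, stated in full; the proofs are below) =====
def Claim_equal_computeUnique : Prop := ∀ (s : String), Dom_computeUnique s → Spec_computeUnique s (computeUnique s)

-- ===== LEMMAS AND PROOFS =====

-- A's running count at step i is the number of distinct chars in the prefix of length i+1 (joined with P).
theorem pvALoop_card (cs : List Char) (m : PySem.Dict Char Int) (P : Finset Char) (cnt : Int)
    (hm : ∀ c, m.contains c = decide (c ∈ P)) (hc : cnt = (P.card : Int)) :
    pvALoop cs m cnt =
      (List.range cs.length).map (fun k => (((P ∪ (cs.take (k + 1)).toFinset).card : Nat) : Int)) := by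
  induction cs generalizing m P cnt with
  | nil => rfl
  | cons ch rest ih =>
    simp only [List.length_cons, List.range_succ_eq_map, List.map_cons, List.map_map]
    have htake : ∀ k : Nat, ((ch :: rest).take (k + 1 + 1)).toFinset
        = insert ch ((rest.take (k + 1)).toFinset) := by
      intro k; simp [List.take_succ_cons]
    simp only [pvALoop, hm ch]
    by_cases hch : ch ∈ P
    · have hPI : insert ch P = P := Finset.insert_eq_self.mpr hch
      simp only [hch, decide_true, if_true]
      congr 1
      · simp [Finset.union_singleton, hPI, hc]
      · rw [ih m P cnt hm hc]
        apply List.map_congr_left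
        intro k _
        simp only [Function.comp]
        rw [htake k, Finset.union_insert, ← Finset.insert_union, hPI]
    · have hcard : ((insert ch P).card : Int) = cnt + 1 := by
        rw [Finset.card_insert_of_notMem hch]; push_cast [hc]; ring
      simp only [hch, decide_false, Bool.false_eq_true, if_false]
      congr 1
      · simp [Finset.union_singleton, hcard]
      · rw [ih (m.insert ch 0) (insert ch P) (cnt + 1) ?_ hcard.symm]
        · apply List.map_congr_left
          intro k _
          simp only [Function.comp]
          rw [htake k, Finset.union_insert, ← Finset.insert_union]
        · intro c
          rw [PySem.Dict.contains_insert, hm c]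
          by_cases he : c = ch <;> simp [he]

theorem setOfList_length (l : List Char) :
    (PySem.Set.ofList l).length = l.toFinset.card := by
  rw [← List.toFinset_card_of_nodup (PySem.Set.nodup_ofList l)]
  congr 1
  ext c
  simp [PySem.Set.mem_ofList]

-- ===== VERDICT (by name: the statement is the Claim_ definition above) =====
theorem computeUnique_spec : Claim_equal_computeUnique := by
  intro s _
  unfold Spec_computeUnique computeUnique computeUnique_alt
  rw [pvALoop_card s.toList PySem.Dict.empty ∅ 0 (by intro c; simp [PySem.Dict.empty]) (by simp),
      PySem.List.pyRange_zero_nat]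
  rw [List.map_map]
  apply List.map_congr_left
  intro k _
  simp only [Function.comp]
  have : ((k : Int) + 1) = ((k + 1 : Nat) : Int) := by push_cast; ring
  rw [this, PySem.List.slice_to_natCast, setOfList_length]
  simp
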